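-- pv_equiv track=rewrite | github.com/jungs04/Ejercicios-prologl-y-Py | mpp.py | estaB
-- ===== SOURCE A (Python) =====
-- def estaB(base,B):
-- 	if not base:
-- 		return []
-- 	if len(base):
-- 		if B == base[0][0]:
-- 			return base[0][1]
-- 		else:
-- 			return estaB(base[1:], B)
-- ===== SOURCE B (Python) =====
-- def estaB(base, B):
--     for pair in base:
--         if B == pair[0]:
--             return pair[1]
--     return []
-- ===== Notes on version B (the rewrite author's own statement) =====
-- stated objective: idiomatic
-- what changed: Replaced slice-based recursion with a single iterative front-to-back loop that returns at the first matching key, with [] after the loop covering both the empty and not-found cases.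
import Mathlib
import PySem

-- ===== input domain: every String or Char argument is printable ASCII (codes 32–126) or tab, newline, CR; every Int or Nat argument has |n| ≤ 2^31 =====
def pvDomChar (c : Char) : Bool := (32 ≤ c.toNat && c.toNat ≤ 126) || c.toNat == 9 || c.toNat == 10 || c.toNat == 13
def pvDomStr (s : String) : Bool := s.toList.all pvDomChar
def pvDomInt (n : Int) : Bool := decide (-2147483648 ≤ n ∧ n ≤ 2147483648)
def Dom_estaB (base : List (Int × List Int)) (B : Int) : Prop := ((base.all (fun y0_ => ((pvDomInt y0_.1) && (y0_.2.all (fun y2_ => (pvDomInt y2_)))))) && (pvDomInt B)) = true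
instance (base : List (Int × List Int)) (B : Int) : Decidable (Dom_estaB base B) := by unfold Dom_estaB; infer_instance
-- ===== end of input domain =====

-- B replaces A's slice-based recursion with an iterative first-match loop (idiomatic; same return value everywhere).

-- ===== PORT A =====
-- literal port of A: empty check, then compare head key, else recurse on base[1:]
def estaB (base : List (Int × List Int)) (B : Int) : List Int :=
  match base with
  | [] => []                                   -- if not base: return []
  | p :: rest =>                               -- len(base) nonzero
    if B == p.1 then p.2
    else estaB (PySem.List.slice (p :: rest) (some 1) none) B
  decreasing_by simp [PySem.List.slice_from_one]

-- ===== PORT B =====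
-- iterative loop over the pairs; after the loop, []
def estaB_alt (base : List (Int × List Int)) (B : Int) : List Int :=
  (base.foldr (fun pair acc => if B == pair.1 then pair.2 else acc) [])

-- ===== PRECONDITION & SPEC =====
def Spec_estaB (base : List (Int × List Int)) (B : Int) (out : List Int) : Prop := out = estaB_alt base B
instance (base : List (Int × List Int)) (B : Int) (out : List Int) : Decidable (Spec_estaB base B out) := by unfold Spec_estaB; infer_instance

-- ===== CLAIM (what is proved, stated in full; the proofs are below) =====
def Claim_equal_estaB : Prop := ∀ (base : List (Int × List Int)) (B : Int), Dom_estaB base B → Spec_estaB base B (estaB base B)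

-- ===== LEMMAS AND PROOFS =====
theorem estaB_eq_alt (base : List (Int × List Int)) (B : Int) :
    estaB base B = estaB_alt base B := by
  induction base with
  | nil => simp [estaB, estaB_alt]
  | cons p rest ih =>
    rw [estaB]
    simp only [PySem.List.slice_from_one, List.tail_cons, estaB_alt, List.foldr_cons]
    split_ifs with h <;> simp_all [estaB_alt]

-- ===== VERDICT (by name: the statement is the Claim_ definition above) =====
theorem estaB_spec : Claim_equal_estaB := by
  intro base B _
  exact estaB_eq_alt base B
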